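-- pv_equiv track=rewrite | github.com/srv-shrma/Sentiment-Analyzer | main.py | per_pronouns
-- ===== SOURCE A (Python) =====
-- def per_pronouns(s):
--     words = s.split()
--     lst = ['i', 'he', 'him', 'her', 'it', 'me', 'she', 'them', 'they', 'us', 'we', 'you']
--     cnt = 0
--     for word in words:
--         if word.lower() in lst:
--             cnt += 1
--     return cnt
-- ===== SOURCE B (Python) =====
-- def per_pronouns(s):
--     freq = {}
--     for w in s.split():
--         lw = w.lower()
--         freq[lw] = freq.get(lw, 0) + 1
--     pronouns = ['i', 'he', 'him', 'her', 'it', 'me', 'she', 'them', 'they', 'us', 'we', 'you']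
--     return sum(freq.get(p, 0) for p in pronouns)
-- ===== Notes on version B (the rewrite author's own statement) =====
-- stated objective: alternative
-- what changed: B builds a frequency table of the lowercased words in one pass and then sums the counts of the 12 pronouns from that table, iterating over the fixed pronoun list instead of testing each word against the list.
import Mathlib
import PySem

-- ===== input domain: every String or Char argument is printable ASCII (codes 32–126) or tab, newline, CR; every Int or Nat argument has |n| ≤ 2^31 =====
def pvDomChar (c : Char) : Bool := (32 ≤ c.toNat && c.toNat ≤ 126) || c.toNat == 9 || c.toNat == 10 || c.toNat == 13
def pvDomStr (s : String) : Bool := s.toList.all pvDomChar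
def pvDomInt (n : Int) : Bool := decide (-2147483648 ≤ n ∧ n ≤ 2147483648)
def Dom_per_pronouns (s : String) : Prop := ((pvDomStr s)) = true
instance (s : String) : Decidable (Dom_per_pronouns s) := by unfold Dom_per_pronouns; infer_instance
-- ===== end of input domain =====

-- B builds a frequency table of the lowercased words once, then sums the pronouns' counts
-- from it (loop over the fixed pronoun list, not over the words) — alternative decomposition.


-- ===== PORT A =====
def pronounLst : List String := ["i", "he", "him", "her", "it", "me", "she", "them", "they", "us", "we", "you"]

def per_pronouns (s : String) : Int :=
  let words := PySem.Str.split₀ s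
  words.foldl (fun cnt word => if pronounLst.contains (PySem.Str.lower word) then cnt + 1 else cnt) 0

-- ===== PORT B =====
def per_pronouns_alt (s : String) : Int :=
  let freq := (PySem.Str.split₀ s).foldl
    (fun d w => d.insert (PySem.Str.lower w) (d.getD (PySem.Str.lower w) 0 + 1)) PySem.Dict.empty
  pronounLst.foldl (fun acc p => acc + freq.getD p 0) 0

-- ===== PRECONDITION & SPEC =====
def Spec_per_pronouns (s : String) (out : Int) : Prop := out = per_pronouns_alt s
instance (s : String) (out : Int) : Decidable (Spec_per_pronouns s out) := by unfold Spec_per_pronouns; infer_instance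

-- ===== CLAIM (what is proved, stated in full; the proofs are below) =====
def Claim_equal_per_pronouns : Prop := ∀ (s : String), Dom_per_pronouns s → Spec_per_pronouns s (per_pronouns s)

-- ===== LEMMAS AND PROOFS =====

lemma sum_ite_eq_count (L : List String) (x : String) :
    (L.map (fun p => if p == x then (1:Int) else 0)).sum = (L.count x : Int) := by
  induction L with
  | nil => simp
  | cons a L ih =>
    simp only [List.map_cons, List.sum_cons, ih, List.count_cons]
    by_cases h : a = x
    · simp [h]; ring
    · simp [h]

lemma nodup_count (L : List String) (hL : L.Nodup) (x : String) :
    (L.count x : Int) = if L.contains x then 1 else 0 := by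
  split_ifs with h
  · have := List.count_eq_one_of_mem hL (by simpa using h)
    simp [this]
  · simp [List.count_eq_zero_of_not_mem (by simpa using h)]

-- counting members of a Nodup list L in xs = summing each element of L's count in xs
lemma countP_contains_eq_sum_counts (L : List String) (hL : L.Nodup) (xs : List String) :
    (xs.countP (fun w => L.contains w) : Int) = (L.map (fun p => (xs.count p : Int))).sum := by
  induction xs with
  | nil => simp
  | cons x xs ih =>
    have hmap : L.map (fun p => ((x :: xs).count p : Int))
        = L.map (fun p => (xs.count p : Int) + (if p == x then 1 else 0)) := by
      apply List.map_congr_left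
      intro p _
      rw [List.count_cons]
      push_cast
      simp [BEq.comm]
    rw [hmap, List.sum_map_add, sum_ite_eq_count, List.countP_cons, ← ih,
        nodup_count L hL x]
    push_cast
    ring

theorem per_pronouns_spec : Claim_equal_per_pronouns := by
  intro s _
  show per_pronouns s = per_pronouns_alt s
  unfold per_pronouns per_pronouns_alt
  have hfold : (PySem.Str.split₀ s).foldl
      (fun (d : PySem.Dict String Int) w => d.insert (PySem.Str.lower w) (d.getD (PySem.Str.lower w) 0 + 1)) PySem.Dict.empty
      = ((PySem.Str.split₀ s).map PySem.Str.lower).foldl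
        (fun d lw => d.insert lw (d.getD lw 0 + 1)) PySem.Dict.empty := by
    rw [List.foldl_map]
  rw [PySem.List.foldl_if_add_one, PySem.List.foldl_add, hfold,
      PySem.Dict.foldl_insert_getD_add_one_eq_counter]
  simp only [zero_add]
  rw [show (fun word => pronounLst.contains (PySem.Str.lower word))
        = ((fun w => pronounLst.contains w) ∘ PySem.Str.lower) from rfl,
      ← List.countP_map, countP_contains_eq_sum_counts pronounLst (by decide)]
  congr 1
  apply List.map_congr_left
  intro p _
  rw [PySem.Dict.getD_counter]
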